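-- pv_equiv track=rewrite | github.com/logan-robbins/spymaster | backend/scripts/build_gold_dataset_campaign.py | _expand_sweep_axes
-- ===== SOURCE A (Python) =====
-- import itertools
-- from typing import Any, Mapping, Sequence
--
-- def _expand_sweep_axes(sweep_axes: Mapping[str, list[Any]]) -> list[dict[str, Any]]:
--     if not sweep_axes:
--         return [{}]
--
--     keys = sorted(sweep_axes.keys())
--     value_lists = [sweep_axes[k] for k in keys]
--     expanded: list[dict[str, Any]] = []
--     for combo in itertools.product(*value_lists):
--         expanded.append(dict(zip(keys, combo)))
--     return expanded
-- ===== SOURCE B (Python) =====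
-- def _expand_sweep_axes(sweep_axes):
--     result = [{}]
--     for k in sorted(sweep_axes.keys()):
--         values = sweep_axes[k]
--         result = [{**partial, k: v} for partial in result for v in values]
--     return result
-- ===== Notes on version B (the rewrite author's own statement) =====
-- stated objective: simpler
-- what changed: Replaces itertools.product plus dict(zip(...)) reassembly with a single iterative fold: start from a single empty partial dict and extend every partial with each value of the next sorted key.
import Mathlib
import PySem

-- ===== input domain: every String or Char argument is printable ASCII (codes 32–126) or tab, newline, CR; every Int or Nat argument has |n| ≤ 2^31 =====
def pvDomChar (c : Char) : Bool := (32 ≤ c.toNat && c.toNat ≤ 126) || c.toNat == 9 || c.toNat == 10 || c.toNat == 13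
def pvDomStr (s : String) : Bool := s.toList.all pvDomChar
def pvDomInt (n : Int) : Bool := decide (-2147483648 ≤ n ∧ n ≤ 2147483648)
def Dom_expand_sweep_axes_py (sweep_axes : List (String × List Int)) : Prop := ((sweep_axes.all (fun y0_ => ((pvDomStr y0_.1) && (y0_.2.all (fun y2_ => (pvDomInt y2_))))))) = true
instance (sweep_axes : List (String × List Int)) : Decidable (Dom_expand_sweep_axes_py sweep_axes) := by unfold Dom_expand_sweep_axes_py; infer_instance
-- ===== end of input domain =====

-- B replaces itertools.product + dict(zip(...)) reassembly with a single fold that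
-- extends every partial dict by each value of the next sorted key (objective: simpler).

-- ===== PORT A =====
-- itertools.product(*value_lists): last axis varies fastest
def pvProduct : List (List Int) → List (List Int)
  | [] => [[]]
  | vs :: rest => vs.flatMap (fun v => (pvProduct rest).map (fun c => v :: c))

def expand_sweep_axes_py (sweep_axes : List (String × List Int)) : List (List (String × Int)) :=
  if sweep_axes = [] then [[]]
  else
    let keys := PySem.List.sorted (PySem.List.dedup (sweep_axes.map Prod.fst)) (fun x => x)
    let value_lists := keys.map (fun k => (PySem.Dict.mk sweep_axes).getD k [])
    (pvProduct value_lists).map (fun combo => (PySem.Dict.ofList (keys.zip combo)).items)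

-- ===== PORT B =====
def expand_sweep_axes_py_alt (sweep_axes : List (String × List Int)) : List (List (String × Int)) :=
  (PySem.List.sorted (PySem.List.dedup (sweep_axes.map Prod.fst)) (fun x => x)).foldl
    (fun result k =>
      result.flatMap (fun p =>
        ((PySem.Dict.mk sweep_axes).getD k []).map
          (fun v => ((PySem.Dict.mk p).insert k v).items)))
    [[]]

-- ===== PRECONDITION & SPEC =====
def Spec_expand_sweep_axes_py (sweep_axes : List (String × List Int)) (out : List (List (String × Int))) : Prop := out = expand_sweep_axes_py_alt sweep_axes
instance (sweep_axes : List (String × List Int)) (out : List (List (String × Int))) : Decidable (Spec_expand_sweep_axes_py sweep_axes out) := by unfold Spec_expand_sweep_axes_py; infer_instance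

-- ===== CLAIM (what is proved, stated in full; the proofs are below) =====
def Claim_equal_expand_sweep_axes_py : Prop := ∀ (sweep_axes : List (String × List Int)), Dom_expand_sweep_axes_py sweep_axes → Spec_expand_sweep_axes_py sweep_axes (expand_sweep_axes_py sweep_axes)

-- ===== LEMMAS AND PROOFS =====

theorem pv_map_fst_zip (ks : List String) (c : List Int) :
    (ks.zip c).map Prod.fst = ks.take c.length := by
  induction ks generalizing c with
  | nil => simp
  | cons k ks ih =>
    cases c with
    | nil => simp
    | cons v c => simp [ih]

theorem pv_ofList_items (l : List (String × Int)) (h : (l.map Prod.fst).Nodup) :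
    (PySem.Dict.ofList l).items = l := by
  have := PySem.Dict.items_foldl_insert_fresh (β := String × Int) l Prod.fst Prod.snd
    PySem.Dict.empty (by intro a _; rfl) h
  simpa [PySem.Dict.ofList, PySem.Dict.update] using this

-- the loop of B, over distinct keys disjoint from every partial, computes
-- (all extensions by the cartesian product of the remaining axes)
theorem pv_fold_eq_prod (g : String → List Int) (ks : List String) (hnd : ks.Nodup)
    (acc : List (List (String × Int)))
    (hdisj : ∀ p ∈ acc, ∀ k ∈ ks, k ∉ p.map Prod.fst) :
    ks.foldl
      (fun result k =>
        result.flatMap (fun p => (g k).map (fun v => ((PySem.Dict.mk p).insert k v).items)))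
      acc
    = acc.flatMap (fun p => (pvProduct (ks.map g)).map (fun c => p ++ ks.zip c)) := by
  induction ks generalizing acc with
  | nil => simp [pvProduct]
  | cons k ks ih =>
    have hknotks : k ∉ ks := (List.nodup_cons.mp hnd).1
    have hndt : ks.Nodup := (List.nodup_cons.mp hnd).2
    rw [List.foldl_cons]
    have hacc' : acc.flatMap (fun p => (g k).map (fun v => ((PySem.Dict.mk p).insert k v).items))
        = acc.flatMap (fun p => (g k).map (fun v => p ++ [(k, v)])) := by
      simp only [List.flatMap]
      congr 1
      apply List.map_congr_left
      intro p hp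
      apply List.map_congr_left
      intro v _
      have hc : (PySem.Dict.mk p).contains k = false := by
        have hnm := hdisj p hp k (List.mem_cons_self ..)
        simp only [PySem.Dict.contains_mk, List.any_eq_false]
        intro q hq
        simp only [beq_iff_eq]
        intro hEq
        exact hnm (List.mem_map.mpr ⟨q, hq, hEq⟩)
      rw [PySem.Dict.items_insert_of_not_contains _ _ hc]
    rw [hacc']
    rw [ih hndt _ ?hd]
    case hd =>
      intro p' hp' k' hk'
      rcases List.mem_flatMap.mp hp' with ⟨p, hp, hpv⟩
      rcases List.mem_map.mp hpv with ⟨v, _, hveq⟩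
      subst hveq
      simp only [List.map_append, List.map_cons, List.map_nil, List.mem_append,
        List.mem_cons, List.not_mem_nil, or_false]
      rintro (hin | hkk)
      · exact hdisj p hp k' (List.mem_cons_of_mem _ hk') hin
      · exact hknotks (hkk ▸ hk')
    simp only [List.map_cons, pvProduct, List.flatMap_assoc, List.flatMap_map,
      List.map_flatMap, List.map_map]
    simp [Function.comp_def, List.zip_cons_cons, List.append_assoc]

-- ===== VERDICT (by name: the statement is the Claim_ definition above) =====
theorem expand_sweep_axes_py_spec : Claim_equal_expand_sweep_axes_py := by
  intro sw _
  unfold Spec_expand_sweep_axes_py expand_sweep_axes_py expand_sweep_axes_py_alt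
  by_cases h : sw = []
  · subst h; rfl
  · simp only [if_neg h]
    have hpw : (PySem.List.sorted (PySem.List.dedup (sw.map Prod.fst)) (fun x => x)).Pairwise (· < ·) := by
      simpa [PySem.List.dedup] using PySem.List.sorted_ofList_pairwise_lt (sw.map Prod.fst)
    have hnd : (PySem.List.sorted (PySem.List.dedup (sw.map Prod.fst)) (fun x => x)).Nodup :=
      hpw.imp (fun hlt => ne_of_lt hlt)
    rw [pv_fold_eq_prod _ _ hnd [[]] (by intro p hp k _ ; simp at hp; subst hp; simp)]
    simp only [List.flatMap_cons, List.flatMap_nil, List.append_nil, List.nil_append]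
    apply List.map_congr_left
    intro c _
    exact pv_ofList_items _ (by rw [pv_map_fst_zip]; exact hnd.sublist (List.take_sublist ..))
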